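-- pv_equiv track=rewrite | github.com/ayaanhossain/nrpcalc | nrpcalc/base/makerchecks.py | compress_locs
-- ===== SOURCE A (Python) =====
-- def compress_locs(locs, homology):
--     '''
--     Compress contigs in locs.
--     '''
--     if not locs:
--         return None
--     else:
--         compressed = []
--         x = locs[0]
--         y = x+homology
--         for pos in range(1, len(locs)):
--             if locs[pos]-locs[pos-1] == 1:
--                 y = locs[pos]+homology
--             else:
--                 compressed.append((x, y))
--                 x = locs[pos]
--                 y = x+homology
--         compressed.append((x, y))
--     return compressed
-- ===== SOURCE B (Python) =====
-- def compress_locs(locs, homology):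
--     if not locs:
--         return None
--     out = []
--     n = len(locs)
--     i = 0
--     while i < n:
--         j = i + 1
--         while j < n and locs[j] - locs[j - 1] == 1:
--             j += 1
--         out.append((locs[i], locs[j - 1] + homology))
--         i = j
--     return out
-- ===== Notes on version B (the rewrite author's own statement) =====
-- stated objective: alternative
-- what changed: Replaced A's single loop with mutable run state (x,y) and conditional flush-append by a two-level run scan: an inner loop finds the end of each maximal consecutive run and one tuple per run is emitted directly, with no running interval state.
import Mathlib
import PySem

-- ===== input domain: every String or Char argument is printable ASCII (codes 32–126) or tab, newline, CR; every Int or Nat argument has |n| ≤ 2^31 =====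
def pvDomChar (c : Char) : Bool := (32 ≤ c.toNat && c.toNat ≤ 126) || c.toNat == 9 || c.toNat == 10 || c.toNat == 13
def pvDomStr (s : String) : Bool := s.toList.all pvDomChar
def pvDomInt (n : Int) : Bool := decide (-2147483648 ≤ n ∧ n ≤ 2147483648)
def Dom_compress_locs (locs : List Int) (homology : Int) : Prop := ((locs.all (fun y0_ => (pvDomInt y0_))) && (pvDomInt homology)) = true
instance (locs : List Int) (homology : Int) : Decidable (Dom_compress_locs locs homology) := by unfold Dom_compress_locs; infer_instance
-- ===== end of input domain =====

-- B replaces A's running-interval accumulator loop by a two-level run scan (inner loop finds each maximal consecutive run, one tuple emitted per run); alternative decomposition, same cost.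


-- ===== PORT A =====
-- literal transliteration: state (compressed, x, y), loop over range(1, len(locs)); flush last run at the end
def compress_locs (locs : List Int) (homology : Int) : Option (List (Int × Int)) :=
  match locs with
  | [] => none
  | l0 :: _ =>
    let x0 : Int := l0
    let y0 : Int := x0 + homology
    let st := (PySem.List.pyRange 1 (locs.length : Int) 1).foldl
      (fun (s : List (Int × Int) × Int × Int) (pos : Int) =>
        if PySem.List.pyGetD locs pos 0 - PySem.List.pyGetD locs (pos - 1) 0 = 1 then
          (s.1, s.2.1, PySem.List.pyGetD locs pos 0 + homology)
        else
          (s.1 ++ [(s.2.1, s.2.2)], PySem.List.pyGetD locs pos 0, PySem.List.pyGetD locs pos 0 + homology))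
      (([] : List (Int × Int)), x0, y0)
    some (st.1 ++ [(st.2.1, st.2.2)])

-- ===== PORT B =====
-- Source B's inner while loop: advance j while j < n and locs[j] - locs[j-1] == 1.
-- All indices touched are in range and nonnegative, so List.getD j 0 is exactly Python's locs[j] here.
def runEnd (locs : List Int) (j : Nat) : Nat :=
  if h : j < locs.length ∧ locs.getD j 0 - locs.getD (j - 1) 0 = 1 then runEnd locs (j + 1) else j
termination_by locs.length - j
decreasing_by omega

-- cited by scan's decreasing_by (the outer while advances i to j = runEnd (i+1) > i)
theorem runEnd_ge (locs : List Int) (j : Nat) : j ≤ runEnd locs j := by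
  fun_induction runEnd locs j with
  | case1 j h ih => omega
  | case2 j h => exact le_refl j

-- Source B's outer while loop: out and i are the loop state
def scan (locs : List Int) (homology : Int) (out : List (Int × Int)) (i : Nat) : List (Int × Int) :=
  if _h : i < locs.length then
    let j := runEnd locs (i + 1)
    scan locs homology (out ++ [(locs.getD i 0, locs.getD (j - 1) 0 + homology)]) j
  else out
termination_by locs.length - i
decreasing_by have := runEnd_ge locs (i + 1); omega

def compress_locs_alt (locs : List Int) (homology : Int) : Option (List (Int × Int)) :=
  if locs = [] then none
  else some (scan locs homology [] 0)

-- ===== PRECONDITION & SPEC =====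
def Spec_compress_locs (locs : List Int) (homology : Int) (out : Option (List (Int × Int))) : Prop := out = compress_locs_alt locs homology
instance (locs : List Int) (homology : Int) (out : Option (List (Int × Int))) : Decidable (Spec_compress_locs locs homology out) := by unfold Spec_compress_locs; infer_instance

-- ===== CLAIM (what is proved, stated in full; the proofs are below) =====
def Claim_equal_compress_locs : Prop := ∀ (locs : List Int) (homology : Int), Dom_compress_locs locs homology → Spec_compress_locs locs homology (compress_locs locs homology)

-- ===== LEMMAS AND PROOFS =====

-- Proof-side reference function: the runs of locs as a structural recursion.
-- Both ports are proved equal (on a nonempty list) to runsB l0 l0 ls.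
def runsB (start prev : Int) (rest : List Int) (homology : Int) : List (Int × Int) :=
  match rest with
  | [] => [(start, prev + homology)]
  | head :: tail =>
    if head - prev = 1 then runsB start head tail homology
    else [(start, prev + homology)] ++ runsB head head tail homology

-- A's loop invariant: folding A's step over indices i..len-1 with run state (x, p+homology),
-- p = locs[i-1], then flushing the last run, yields acc ++ runsB x p (locs.drop i).
theorem compress_loop_eq (locs : List Int) (homology : Int) (i : Nat) (acc : List (Int × Int))
    (x p : Int) (h1 : 1 ≤ i) (h2 : i ≤ locs.length) (hp : p = locs.getD (i - 1) 0) :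
    (let st := (PySem.List.pyRange (i : Int) (locs.length : Int) 1).foldl
      (fun (s : List (Int × Int) × Int × Int) (pos : Int) =>
        if PySem.List.pyGetD locs pos 0 - PySem.List.pyGetD locs (pos - 1) 0 = 1 then
          (s.1, s.2.1, PySem.List.pyGetD locs pos 0 + homology)
        else
          (s.1 ++ [(s.2.1, s.2.2)], PySem.List.pyGetD locs pos 0, PySem.List.pyGetD locs pos 0 + homology))
      (acc, x, p + homology)
     st.1 ++ [(st.2.1, st.2.2)]) = acc ++ runsB x p (locs.drop i) homology := by
  induction hn : locs.length - i generalizing i acc x p with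
  | zero =>
    have hi : i = locs.length := by omega
    subst hi
    rw [PySem.List.pyRange_one_eq_nil (by omega)]
    simp [List.drop_of_length_le, runsB]
  | succ n ih =>
    have hlt : i < locs.length := by omega
    rw [PySem.List.pyRange_one_cons (by exact_mod_cast hlt)]
    have hdrop : locs.drop i = locs[i] :: locs.drop (i + 1) := List.drop_eq_getElem_cons hlt
    have hg1 : PySem.List.pyGetD locs (i : Int) 0 = locs[i] := by
      rw [PySem.List.pyGetD_natCast]; simp [List.getD, hlt]
    have hg0 : PySem.List.pyGetD locs ((i : Int) - 1) 0 = p := by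
      have : ((i : Int) - 1) = ((i - 1 : Nat) : Int) := by omega
      rw [this, PySem.List.pyGetD_natCast, hp]
    simp only [List.foldl_cons, hg1, hg0]
    have hpnext : locs[i] = locs.getD (i + 1 - 1) 0 := by simp [List.getD, hlt]
    have hcast : ((i : Int) + 1) = ((i + 1 : Nat) : Int) := by omega
    by_cases hc : locs[i] - p = 1
    · simp only [hc, if_true]
      rw [hcast, ih (i + 1) acc x locs[i] (by omega) (by omega) hpnext (by omega)]
      rw [hdrop]
      simp [runsB, hc]
    · rw [if_neg hc]
      rw [hcast, ih (i + 1) (acc ++ [(x, p + homology)]) locs[i] locs[i] (by omega) (by omega) hpnext (by omega)]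
      rw [hdrop]
      simp [runsB, hc]

-- runsB starting just after position j-1 is one run (up to runEnd locs j) followed by the rest.
theorem runsB_runEnd (locs : List Int) (homology : Int) (j : Nat) (x : Int)
    (h1 : 1 ≤ j) (h2 : j ≤ locs.length) :
    runsB x (locs.getD (j - 1) 0) (locs.drop j) homology =
      if runEnd locs j < locs.length then
        (x, locs.getD (runEnd locs j - 1) 0 + homology) ::
          runsB (locs.getD (runEnd locs j) 0) (locs.getD (runEnd locs j) 0)
            (locs.drop (runEnd locs j + 1)) homology
      else [(x, locs.getD (runEnd locs j - 1) 0 + homology)] := by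
  induction hn : locs.length - j generalizing j x with
  | zero =>
    have hj : j = locs.length := by omega
    have hre : runEnd locs j = j := by rw [runEnd]; simp [hj]
    rw [hre, if_neg (by omega)]
    subst hj
    simp [runsB]
  | succ n ih =>
    have hlt : j < locs.length := by omega
    have hdrop : locs.drop j = locs[j] :: locs.drop (j + 1) := List.drop_eq_getElem_cons hlt
    have hgj : locs.getD j 0 = locs[j] := by simp [List.getD, hlt]
    rw [hdrop]
    by_cases hc : locs[j] - locs.getD (j - 1) 0 = 1
    · have hre : runEnd locs j = runEnd locs (j + 1) := by
        rw [runEnd]; rw [dif_pos ⟨hlt, by rw [hgj]; exact hc⟩]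
      have hnext : locs[j] = locs.getD (j + 1 - 1) 0 := by simp [List.getD, hlt]
      rw [show runsB x (locs.getD (j - 1) 0) (locs[j] :: locs.drop (j + 1)) homology
            = runsB x locs[j] (locs.drop (j + 1)) homology by
          simp only [runsB]; rw [if_pos hc]]
      rw [hre, hnext, ih (j + 1) x (by omega) (by omega) (by omega)]
    · have hre : runEnd locs j = j := by
        rw [runEnd]; rw [dif_neg (by rw [hgj]; tauto)]
      rw [hre, if_pos hlt]
      simp only [runsB]; rw [if_neg hc, hgj]
      simp

-- B's outer loop equals runsB on the remaining suffix.
theorem scan_eq (locs : List Int) (homology : Int) (i : Nat) (out : List (Int × Int))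
    (hlt : i < locs.length) :
    scan locs homology out i =
      out ++ runsB (locs.getD i 0) (locs.getD i 0) (locs.drop (i + 1)) homology := by
  have H : ∀ n (i : Nat) (out : List (Int × Int)), i < locs.length → locs.length - i = n →
      scan locs homology out i =
        out ++ runsB (locs.getD i 0) (locs.getD i 0) (locs.drop (i + 1)) homology := by
    intro n
    induction n using Nat.strong_induction_on with
    | _ n ih =>
      intro i out hlt hn
      rw [scan, dif_pos hlt]
      rw [show runsB (locs.getD i 0) (locs.getD i 0) (locs.drop (i + 1)) homology
            = runsB (locs.getD i 0) (locs.getD (i + 1 - 1) 0) (locs.drop (i + 1)) homology by simp]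
      rw [runsB_runEnd locs homology (i + 1) (locs.getD i 0) (by omega) (by omega)]
      have hge := runEnd_ge locs (i + 1)
      by_cases hj : runEnd locs (i + 1) < locs.length
      · rw [if_pos hj]
        rw [ih (locs.length - runEnd locs (i + 1)) (by omega) (runEnd locs (i + 1))
            (out ++ [(locs.getD i 0, locs.getD (runEnd locs (i + 1) - 1) 0 + homology)]) hj rfl]
        simp
      · rw [if_neg hj]
        rw [scan, dif_neg hj]
  exact H (locs.length - i) i out hlt rfl

-- ===== VERDICT (by name: the statement is the Claim_ definition above) =====
theorem compress_locs_spec : Claim_equal_compress_locs := by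
  intro locs homology _
  unfold Spec_compress_locs
  match locs with
  | [] => rfl
  | l0 :: ls =>
    have hA := compress_loop_eq (l0 :: ls) homology 1 [] l0 l0 (le_refl 1) (by simp) (by simp)
    simp only [Nat.cast_one, List.drop_succ_cons, List.drop_zero, List.nil_append] at hA
    have hB := scan_eq (l0 :: ls) homology 0 [] (by simp)
    simp only [List.getD, List.drop_succ_cons, List.drop_zero, List.nil_append,
      List.getElem?_cons_zero, Option.getD_some] at hB
    rw [show compress_locs_alt (l0 :: ls) homology = some (scan (l0 :: ls) homology [] 0) by
      simp [compress_locs_alt]]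
    rw [hB]
    exact congrArg some hA
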